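-- pv_equiv track=rewrite | github.com/nnb9797/PythonHomeworkSeminar3 | HW3_Task2.py | pairs_multiplication
-- ===== SOURCE A (Python) =====
-- def pairs_multiplication(numbers):
--     results = []
--     while len(numbers) > 1:
--         results.append(numbers[0] * numbers[-1])
--         del numbers[0]
--         del numbers[-1]
--     if len(numbers) == 1: results.append(numbers[0] ** 2)
--     return results
-- ===== SOURCE B (Python) =====
-- def pairs_multiplication(numbers):
--     n = len(numbers)
--     results = [numbers[i] * numbers[n - 1 - i] for i in range(n // 2)]
--     if n % 2:
--         results.append(numbers[n // 2] ** 2)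
--     return results
-- ===== Notes on version B (the rewrite author's own statement) =====
-- stated objective: faster
-- what changed: B reads each pair by index from both ends in one pass instead of repeatedly deleting the first and last element of the list (each del at index 0 is O(n)).
import Mathlib
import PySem

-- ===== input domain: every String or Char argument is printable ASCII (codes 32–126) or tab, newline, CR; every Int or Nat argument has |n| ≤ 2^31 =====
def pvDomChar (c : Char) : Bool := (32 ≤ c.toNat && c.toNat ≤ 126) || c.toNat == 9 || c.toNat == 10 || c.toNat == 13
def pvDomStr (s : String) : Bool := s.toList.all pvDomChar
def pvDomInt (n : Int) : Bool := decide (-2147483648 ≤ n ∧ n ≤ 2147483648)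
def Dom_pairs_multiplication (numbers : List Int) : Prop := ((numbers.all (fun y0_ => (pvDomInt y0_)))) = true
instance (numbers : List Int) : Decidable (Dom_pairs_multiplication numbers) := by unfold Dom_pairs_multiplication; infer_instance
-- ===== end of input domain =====

-- B pairs elements by index from both ends in one pass instead of A's repeated
-- deletion of the first and last element (faster in a timing run's measure).
-- A empties its argument list in place; the equivalence proved here is about the
-- RETURN value only (B does not mutate).

-- ===== PORT A =====
-- A's while-loop: each iteration appends numbers[0]*numbers[-1], then deletes the
-- first and the last element; the recursion consumes the head and the last element.
def pairs_multiplication (numbers : List Int) : List Int :=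
  match numbers with
  | [] => []
  | [x] => [x * x]
  | x :: y :: rest =>
      x * ((y :: rest).getLast (by simp)) :: pairs_multiplication ((y :: rest).dropLast)
termination_by numbers.length
decreasing_by simp [List.length_dropLast]

-- ===== PORT B =====
def pairs_multiplication_alt (numbers : List Int) : List Int :=
  ((List.range (numbers.length / 2)).map
      (fun i => numbers.getD i 0 * numbers.getD (numbers.length - 1 - i) 0))
    ++ (if numbers.length % 2 = 1 then
          [numbers.getD (numbers.length / 2) 0 * numbers.getD (numbers.length / 2) 0]
        else [])

-- ===== PRECONDITION & SPEC =====
def Spec_pairs_multiplication (numbers : List Int) (out : List Int) : Prop := out = pairs_multiplication_alt numbers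
instance (numbers : List Int) (out : List Int) : Decidable (Spec_pairs_multiplication numbers out) := by unfold Spec_pairs_multiplication; infer_instance

-- ===== CLAIM (what is proved, stated in full; the proofs are below) =====
def Claim_equal_pairs_multiplication : Prop := ∀ (numbers : List Int), Dom_pairs_multiplication numbers → Spec_pairs_multiplication numbers (pairs_multiplication numbers)

-- ===== LEMMAS AND PROOFS =====

lemma getD_append_left (m : List Int) (z : Int) (j : Nat) (h : j < m.length) :
    (m ++ [z]).getD j 0 = m.getD j 0 := by
  simp [List.getD, List.getElem?_append_left h]

-- peeling the outermost pair off B's closed form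
lemma alt_cons_concat (x z : Int) (m : List Int) :
    pairs_multiplication_alt (x :: (m ++ [z])) = x * z :: pairs_multiplication_alt m := by
  unfold pairs_multiplication_alt
  have hlen : (x :: (m ++ [z])).length = m.length + 2 := by simp
  rw [hlen]
  have hdiv : (m.length + 2) / 2 = m.length / 2 + 1 := by omega
  have hmod : (m.length + 2) % 2 = m.length % 2 := by omega
  rw [hdiv, hmod, List.range_succ_eq_map]
  simp only [List.map_cons, List.map_map]
  have hhead : (x :: (m ++ [z])).getD 0 0 * (x :: (m ++ [z])).getD (m.length + 2 - 1 - 0) 0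
      = x * z := by
    have : m.length + 2 - 1 - 0 = m.length + 1 := by omega
    rw [this]
    simp [List.getD]
  have hmap : (List.range (m.length / 2)).map
        ((fun i => (x :: (m ++ [z])).getD i 0 * (x :: (m ++ [z])).getD (m.length + 2 - 1 - i) 0) ∘ Nat.succ)
      = (List.range (m.length / 2)).map (fun j => m.getD j 0 * m.getD (m.length - 1 - j) 0) := by
    apply List.map_congr_left
    intro j hj
    have hj' : j < m.length / 2 := List.mem_range.mp hj
    have hjm : j < m.length := by omega
    simp only [Function.comp]
    have h1 : (x :: (m ++ [z])).getD (Nat.succ j) 0 = m.getD j 0 := by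
      simp only [Nat.succ_eq_add_one, List.getD_cons_succ]
      exact getD_append_left m z j hjm
    have hidx : m.length + 2 - 1 - Nat.succ j = m.length - j := by omega
    have h2 : (x :: (m ++ [z])).getD (m.length - j) 0 = m.getD (m.length - 1 - j) 0 := by
      have hpos : m.length - j = (m.length - 1 - j) + 1 := by omega
      rw [hpos, List.getD_cons_succ]
      exact getD_append_left m z _ (by omega)
    rw [h1, hidx, h2]
  rw [hhead, hmap]
  by_cases hodd : m.length % 2 = 1
  · have hlt : m.length / 2 < m.length := by omega
    simp [hodd, List.getElem?_append_left hlt]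
  · simp [hodd]

lemma pm_eq_alt (l : List Int) : pairs_multiplication l = pairs_multiplication_alt l := by
  induction l using pairs_multiplication.induct with
  | case1 => simp [pairs_multiplication, pairs_multiplication_alt]
  | case2 x => simp [pairs_multiplication, pairs_multiplication_alt]
  | case3 x y rest ih =>
      rw [pairs_multiplication, ih]
      have hne : (y :: rest) ≠ [] := by simp
      have hsplit : y :: rest = (y :: rest).dropLast ++ [(y :: rest).getLast hne] :=
        (List.dropLast_append_getLast hne).symm
      calc x * (y :: rest).getLast (by simp) :: pairs_multiplication_alt (y :: rest).dropLast
          = pairs_multiplication_alt (x :: ((y :: rest).dropLast ++ [(y :: rest).getLast hne])) := by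
            rw [alt_cons_concat]
        _ = pairs_multiplication_alt (x :: y :: rest) := by rw [← hsplit]

-- ===== VERDICT (by name: the statement is the Claim_ definition above) =====
theorem pairs_multiplication_spec : Claim_equal_pairs_multiplication := by
  intro numbers _
  exact pm_eq_alt numbers
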